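-- pv_equiv track=rewrite | github.com/TKratter/PTDR-crusher | experiments/ptdr/validate_dataset.py | domain_is_included
-- ===== SOURCE A (Python) =====
-- from typing import Iterable, Sequence
--
-- def domain_is_included(domain: str, include_domains: Sequence[str] | None) -> bool:
--     if not include_domains:
--         return True
--     for candidate in include_domains:
--         candidate = candidate.strip().strip("/")
--         if not candidate:
--             continue
--         if domain == candidate or domain.startswith(candidate + "/"):
--             return True
--     return False
-- ===== SOURCE B (Python) =====
-- def domain_is_included(domain, include_domains):
--     if not include_domains:
--         return True
--     candidates = {c.strip().strip("/") for c in include_domains} - {""}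
--     if domain in candidates:
--         return True
--     return any(domain[:i] in candidates
--                for i in range(len(domain)) if domain[i] == "/")
-- ===== Notes on version B (the rewrite author's own statement) =====
-- stated objective: alternative
-- what changed: Instead of scanning the candidate list and running a startswith test per candidate, B builds a set of normalized non-empty candidates once and probes it with the domain's slash-boundary prefixes (the full domain plus each prefix ending at a '/').
import Mathlib
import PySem

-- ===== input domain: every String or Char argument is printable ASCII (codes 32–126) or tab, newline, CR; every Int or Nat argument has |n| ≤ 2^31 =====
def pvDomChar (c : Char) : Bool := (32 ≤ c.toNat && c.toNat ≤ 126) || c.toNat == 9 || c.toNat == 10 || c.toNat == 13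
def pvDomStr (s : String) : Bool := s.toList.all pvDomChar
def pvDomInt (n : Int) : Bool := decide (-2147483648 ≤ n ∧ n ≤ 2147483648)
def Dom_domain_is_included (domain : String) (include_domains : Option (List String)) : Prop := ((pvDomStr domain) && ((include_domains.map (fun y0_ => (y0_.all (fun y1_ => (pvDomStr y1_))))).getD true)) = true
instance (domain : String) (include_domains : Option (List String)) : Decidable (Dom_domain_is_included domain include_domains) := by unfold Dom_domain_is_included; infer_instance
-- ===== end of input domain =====

-- ===== PORT A =====
-- B differs from A by a hash-set of normalized candidates probed with the domain's slash-boundary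
-- prefixes, instead of A's scan of the candidate list with a startswith test per candidate.
-- shared helper: candidate.strip().strip("/")
def pvNorm (c : String) : String := PySem.Str.stripChars (PySem.Str.strip c) "/"

-- A's for-loop with early return
def pvALoop (domain : String) : List String → Bool
  | [] => false
  | cand :: rest =>
    if pvNorm cand = "" then pvALoop domain rest
    else if domain = pvNorm cand ∨ PySem.Chars.startswith domain.toList ((pvNorm cand).toList ++ ['/']) = true then true
    else pvALoop domain rest

def domain_is_included (domain : String) (include_domains : Option (List String)) : Bool :=
  match include_domains with
  | none => true
  | some [] => true
  | some l => pvALoop domain l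

-- ===== PORT B =====
-- B's copy of the normalizer c.strip().strip("/") (not shared with A's port)
def pvNormB (c : String) : String := PySem.Str.stripChars (PySem.Str.strip c) "/"

def domain_is_included_alt (domain : String) (include_domains : Option (List String)) : Bool :=
  match include_domains with
  | none => true
  | some l =>
    if l.isEmpty then true else
    let candidates : PySem.Set String := PySem.Set.diff (PySem.Set.ofList (l.map pvNormB)) [""]
    if PySem.Set.contains candidates domain then true
    else
      ((List.range domain.toList.length).filter
          (fun i => domain.toList[i]? == some '/')).any
        (fun i => PySem.Set.contains candidates (String.ofList (domain.toList.take i)))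

-- ===== PRECONDITION & SPEC =====
def Spec_domain_is_included (domain : String) (include_domains : Option (List String)) (out : Bool) : Prop := out = domain_is_included_alt domain include_domains
instance (domain : String) (include_domains : Option (List String)) (out : Bool) : Decidable (Spec_domain_is_included domain include_domains out) := by unfold Spec_domain_is_included; infer_instance

-- ===== CLAIM (what is proved, stated in full; the proofs are below) =====
def Claim_equal_domain_is_included : Prop := ∀ (domain : String) (include_domains : Option (List String)), Dom_domain_is_included domain include_domains → Spec_domain_is_included domain include_domains (domain_is_included domain include_domains)

-- ===== LEMMAS AND PROOFS =====

-- what it means for one normalized candidate to cover the domain (A's per-candidate test)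
def pvHit (dl : List Char) (c : String) : Prop :=
  c ≠ "" ∧ (dl = c.toList ∨ (c.toList ++ ['/']) <+: dl)

lemma pvALoop_iff (domain : String) (l : List String) :
    pvALoop domain l = true ↔ ∃ c ∈ l, pvHit domain.toList (pvNorm c) := by
  induction l with
  | nil => simp [pvALoop]
  | cons cand rest ih =>
    simp only [pvALoop]
    split_ifs with h1 h2
    · rw [ih]
      constructor
      · rintro ⟨c, hc, hhit⟩; exact ⟨c, List.mem_cons_of_mem _ hc, hhit⟩
      · rintro ⟨c, hc, hhit⟩
        rcases List.mem_cons.mp hc with rfl | hc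
        · exact absurd h1 hhit.1
        · exact ⟨c, hc, hhit⟩
    · simp only [true_iff]
      refine ⟨cand, List.mem_cons_self, h1, ?_⟩
      rcases h2 with h2 | h2
      · exact Or.inl (by rw [h2])
      · exact Or.inr ((PySem.Chars.startswith_iff _ _).mp h2)
    · rw [ih]
      constructor
      · rintro ⟨c, hc, hhit⟩; exact ⟨c, List.mem_cons_of_mem _ hc, hhit⟩
      · rintro ⟨c, hc, hne, hcase⟩
        rcases List.mem_cons.mp hc with rfl | hc
        · exfalso; apply h2
          rcases hcase with hcase | hcase
          · exact Or.inl (String.toList_injective hcase)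
          · exact Or.inr ((PySem.Chars.startswith_iff _ _).mpr hcase)
        · exact ⟨c, hc, hne, hcase⟩

-- the slash-boundary prefix characterisation of A's startswith test
lemma pvPrefix_iff (dl cl : List Char) :
    (cl ++ ['/']) <+: dl ↔
      ∃ i, i < dl.length ∧ dl[i]? = some '/' ∧ cl = dl.take i := by
  constructor
  · rintro ⟨t, ht⟩
    refine ⟨cl.length, ?_, ?_, ?_⟩
    · rw [← ht]; simp [List.length_append]
    · rw [← ht, List.append_assoc, List.getElem?_append_right (le_refl _)]
      simp
    · rw [← ht, List.append_assoc]
      exact (List.take_left' rfl).symm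
  · rintro ⟨i, hi, hget, rfl⟩
    have h1 : dl.take i ++ ['/'] = dl.take (i + 1) := by
      rw [List.take_add_one, hget]; rfl
    rw [h1]; exact List.take_prefix _ _

lemma pvNormB_eq : pvNormB = pvNorm := rfl

lemma pvMem_candidates (l : List String) (x : String) :
    x ∈ PySem.Set.diff (PySem.Set.ofList (l.map pvNorm)) [""] ↔
      (∃ c ∈ l, pvNorm c = x) ∧ x ≠ "" := by
  simp [PySem.Set.diff, PySem.Set.mem_ofList]

lemma pvAlt_loop_iff (domain : String) (c0 : String) (l0 : List String) :
    domain_is_included_alt domain (some (c0 :: l0)) = true ↔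
      ∃ c ∈ c0 :: l0, pvHit domain.toList (pvNorm c) := by
  simp only [domain_is_included_alt, pvNormB_eq, List.isEmpty_cons, Bool.false_eq_true,
    if_false]
  set S := PySem.Set.diff (PySem.Set.ofList ((c0 :: l0).map pvNorm)) [""] with hS
  split_ifs with h
  · simp only [true_iff]
    obtain ⟨⟨c, hc, hnorm⟩, hne⟩ := (pvMem_candidates _ _).mp ((PySem.Set.contains_iff _ _).mp h)
    exact ⟨c, hc, by rw [hnorm]; exact hne, Or.inl (by rw [hnorm])⟩
  · have hnot : domain ∉ S := fun hmem => h ((PySem.Set.contains_iff _ _).mpr hmem)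
    rw [List.any_eq_true]
    constructor
    · rintro ⟨i, hmemf, hcont⟩
      obtain ⟨hir, hslash⟩ := List.mem_filter.mp hmemf
      have hi : i < domain.toList.length := List.mem_range.mp hir
      have hslash' : domain.toList[i]? = some '/' := by
        simpa using hslash
      obtain ⟨⟨c, hc, hnorm⟩, hne⟩ :=
        (pvMem_candidates _ _).mp ((PySem.Set.contains_iff _ _).mp hcont)
      refine ⟨c, hc, ?_, Or.inr ?_⟩
      · intro h0; rw [h0] at hnorm; exact hne hnorm.symm
      · rw [pvPrefix_iff]
        exact ⟨i, hi, hslash', by rw [hnorm]; simp⟩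
    · rintro ⟨c, hc, hne, hcase⟩
      rcases hcase with hcase | hcase
      · exfalso; apply hnot
        rw [pvMem_candidates]
        refine ⟨⟨c, hc, String.toList_injective ?_⟩, ?_⟩
        · rw [hcase]
        · intro h0; rw [h0] at hcase
          apply hne; apply String.toList_injective
          exact hcase.symm
      · obtain ⟨i, hi, hget, htake⟩ := (pvPrefix_iff _ _).mp hcase
        refine ⟨i, List.mem_filter.mpr ⟨List.mem_range.mpr hi, by simpa using hget⟩, ?_⟩
        rw [PySem.Set.contains_iff, pvMem_candidates]
        refine ⟨⟨c, hc, String.toList_injective ?_⟩, ?_⟩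
        · rw [htake]; simp
        · intro h0
          apply hne; apply String.toList_injective
          rw [htake, ← congrArg String.toList h0]; simp
        
-- ===== VERDICT (by name: the statement is the Claim_ definition above) =====
theorem domain_is_included_spec : Claim_equal_domain_is_included := by
  intro domain inc _
  unfold Spec_domain_is_included
  match inc with
  | none => rfl
  | some [] => rfl
  | some (c :: l) =>
    show pvALoop domain (c :: l) = domain_is_included_alt domain (some (c :: l))
    rw [Bool.eq_iff_iff, pvALoop_iff, pvAlt_loop_iff]
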